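-- pv_equiv track=rewrite | github.com/transformerlab/transformerlab-app | api/transformerlab/services/profiler_service.py | _select_time_columns
-- ===== SOURCE A (Python) =====
-- def _select_time_columns(columns: list[str]) -> tuple[str | None, str | None, str | None]:
--     lowered = {col.lower(): col for col in columns}
--     start_col = (
--         lowered.get("start")
--         or lowered.get("startns")
--         or lowered.get("start_ns")
--         or lowered.get("begin")
--         or lowered.get("timestamp")
--     )
--     end_col = lowered.get("end") or lowered.get("endns") or lowered.get("end_ns") or lowered.get("finish")
--     duration_col = (
--         lowered.get("duration")
--         or lowered.get("dur")
--         or lowered.get("dur_ns")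
--         or lowered.get("durationns")
--         or lowered.get("time")
--     )
--     return start_col, end_col, duration_col
-- ===== SOURCE B (Python) =====
-- _START = ("start", "startns", "start_ns", "begin", "timestamp")
-- _END = ("end", "endns", "end_ns", "finish")
-- _DURATION = ("duration", "dur", "dur_ns", "durationns", "time")
--
--
-- def _rank(names, low):
--     i = 0
--     for n in names:
--         if low == n:
--             return i
--         i += 1
--     return None
--
--
-- def _select_time_columns(columns: list[str]) -> tuple[str | None, str | None, str | None]:
--     # One pass: per category keep the best (priority-rank, column) seen so far;
--     # a later column with rank <= current best replaces it (last occurrence wins).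
--     best = [None, None, None]
--     for col in columns:
--         low = col.lower()
--         for j, names in enumerate((_START, _END, _DURATION)):
--             r = _rank(names, low)
--             if r is not None and (best[j] is None or r <= best[j][0]):
--                 best[j] = (r, col)
--     return (
--         best[0][1] if best[0] else None,
--         best[1][1] if best[1] else None,
--         best[2][1] if best[2] else None,
--     )
-- ===== Notes on version B (the rewrite author's own statement) =====
-- stated objective: alternative
-- what changed: Replaces A's lowered-name dict plus or-chained lookups by a single left-to-right pass that keeps, per category, the best (priority-rank, column) accumulator, replacing on rank <= best so the last occurrence wins.
import Mathlib
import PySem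

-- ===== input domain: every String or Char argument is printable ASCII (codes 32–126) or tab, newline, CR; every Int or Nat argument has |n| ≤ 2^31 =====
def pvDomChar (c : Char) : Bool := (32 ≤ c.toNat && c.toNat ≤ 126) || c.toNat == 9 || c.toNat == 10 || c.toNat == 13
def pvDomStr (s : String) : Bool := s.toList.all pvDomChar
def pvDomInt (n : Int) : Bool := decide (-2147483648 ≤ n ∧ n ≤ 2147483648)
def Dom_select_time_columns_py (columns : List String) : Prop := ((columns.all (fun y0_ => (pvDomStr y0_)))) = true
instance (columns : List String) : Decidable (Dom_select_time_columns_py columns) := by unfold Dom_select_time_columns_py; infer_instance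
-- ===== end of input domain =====

-- B replaces A's lowered-name dict + or-chained lookups by one pass keeping a
-- best (priority-rank, column) accumulator per category; alternative decomposition.

-- ===== PORT A =====
-- Python's 'x or y' on an Optional[str]: None and "" are falsy.
def pyOr (a b : Option String) : Option String :=
  match a with
  | some s => if s = "" then b else some s
  | none => b

def select_time_columns_py (columns : List String) : Option String × Option String × Option String :=
  let lowered : PySem.Dict String String :=
    columns.foldl (fun d col => d.insert (PySem.Str.lower col) col) PySem.Dict.empty
  let start_col := pyOr (lowered.get? "start") (pyOr (lowered.get? "startns")
    (pyOr (lowered.get? "start_ns") (pyOr (lowered.get? "begin") (lowered.get? "timestamp"))))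
  let end_col := pyOr (lowered.get? "end") (pyOr (lowered.get? "endns")
    (pyOr (lowered.get? "end_ns") (lowered.get? "finish")))
  let duration_col := pyOr (lowered.get? "duration") (pyOr (lowered.get? "dur")
    (pyOr (lowered.get? "dur_ns") (pyOr (lowered.get? "durationns") (lowered.get? "time"))))
  (start_col, end_col, duration_col)

-- ===== PORT B =====
def startNames : List String := ["start", "startns", "start_ns", "begin", "timestamp"]
def endNames : List String := ["end", "endns", "end_ns", "finish"]
def durNames : List String := ["duration", "dur", "dur_ns", "durationns", "time"]

-- _rank: index of `low` in `names`, counting from i (caller passes 0).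
def rankIn : List String → Nat → String → Option Nat
  | [], _, _ => none
  | n :: rest, i, low => if low = n then some i else rankIn rest (i + 1) low

-- the accumulator update: replace when the new rank is defined and ≤ the best one.
def stepB (b : Option (Nat × String)) (r? : Option Nat) (col : String) : Option (Nat × String) :=
  match r? with
  | none => b
  | some r =>
    match b with
    | none => some (r, col)
    | some p => if r ≤ p.1 then some (r, col) else b

def select_time_columns_py_alt (columns : List String) : Option String × Option String × Option String :=
  let best := columns.foldl
    (fun (b : Option (Nat × String) × Option (Nat × String) × Option (Nat × String)) col =>
      let low := PySem.Str.lower col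
      (stepB b.1 (rankIn startNames 0 low) col,
       stepB b.2.1 (rankIn endNames 0 low) col,
       stepB b.2.2 (rankIn durNames 0 low) col))
    (none, none, none)
  (best.1.map Prod.snd, best.2.1.map Prod.snd, best.2.2.map Prod.snd)

-- ===== PRECONDITION & SPEC =====
def Spec_select_time_columns_py (columns : List String) (out : Option String × Option String × Option String) : Prop := out = select_time_columns_py_alt columns
instance (columns : List String) (out : Option String × Option String × Option String) : Decidable (Spec_select_time_columns_py columns out) := by unfold Spec_select_time_columns_py; infer_instance

-- ===== CLAIM (what is proved, stated in full; the proofs are below) =====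
def Claim_equal_select_time_columns_py : Prop := ∀ (columns : List String), Dom_select_time_columns_py columns → Spec_select_time_columns_py columns (select_time_columns_py columns)

-- ===== LEMMAS AND PROOFS =====

-- A's lowered dict looked up at k is the last column whose lower() is k.
theorem get_low_aux (columns : List String) :
    ∀ (d : PySem.Dict String String) (k : String),
      (columns.foldl (fun d c => d.insert (PySem.Str.lower c) c) d).get? k
        = (columns.reverse.find? (fun c => PySem.Str.lower c == k)).or (d.get? k) := by
  induction columns with
  | nil => intro d k; simp
  | cons c cs ih =>
    intro d k
    simp only [List.foldl_cons, List.reverse_cons, List.find?_append, ih, Option.or_assoc]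
    congr 1
    by_cases h : PySem.Str.lower c = k
    · subst h; simp
    · simp [PySem.Dict.get?_insert, h, Ne.symm h]

theorem get_low (columns : List String) (k : String) :
    (columns.foldl (fun d c => d.insert (PySem.Str.lower c) c)
        (PySem.Dict.empty : PySem.Dict String String)).get? k
      = columns.reverse.find? (fun c => PySem.Str.lower c == k) := by
  simp [get_low_aux]

-- pyOr on the dict lookup at a nonempty name behaves like a plain match.
theorem pyOr_find (columns : List String) (n : String) (hn : n ≠ "")
    (r : Option String) :
    pyOr (columns.reverse.find? (fun c => PySem.Str.lower c == n)) r
      = match columns.reverse.find? (fun c => PySem.Str.lower c == n) with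
        | some c => some c
        | none => r := by
  cases h : columns.reverse.find? (fun c => PySem.Str.lower c == n) with
  | none => rfl
  | some c =>
    have hc := List.find?_some h
    have hlc : PySem.Str.lower c = n := by simpa using hc
    have hne : c ≠ "" := by
      intro he
      subst he
      have : PySem.Str.lower "" = "" := by decide
      rw [this] at hlc
      exact hn hlc.symm
    simp [pyOr, hne]

-- proof-side characterization: first candidate (from index i) that matches some
-- column, paired with the LAST matching column.
def auxT : List String → Nat → List String → Option (Nat × String)
  | [], _, _ => none
  | n :: rest, i, xs =>
    match xs.reverse.find? (fun c => PySem.Str.lower c == n) with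
    | some c => some (i, c)
    | none => auxT rest (i + 1) xs

theorem rankIn_ge (L : List String) : ∀ (i : Nat) (s : String) (r : Nat),
    rankIn L i s = some r → i ≤ r := by
  induction L with
  | nil => intro i s r h; simp [rankIn] at h
  | cons n rest ih =>
    intro i s r h
    by_cases hs : s = n
    · simp [rankIn, hs] at h; omega
    · simp [rankIn, hs] at h; have := ih (i + 1) s r h; omega

theorem auxT_ge (L : List String) : ∀ (i : Nat) (xs : List String) (j : Nat) (c : String),
    auxT L i xs = some (j, c) → i ≤ j := by
  induction L with
  | nil => intro i xs j c h; simp [auxT] at h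
  | cons n rest ih =>
    intro i xs j c h
    unfold auxT at h
    cases hf : xs.reverse.find? (fun c => PySem.Str.lower c == n) with
    | some c' => rw [hf] at h; simp at h; omega
    | none => rw [hf] at h; have := ih (i + 1) xs j c h; omega

theorem auxT_append (L : List String) : ∀ (i : Nat) (xs : List String) (c : String),
    auxT L i (xs ++ [c]) = stepB (auxT L i xs) (rankIn L i (PySem.Str.lower c)) c := by
  induction L with
  | nil => intro i xs c; simp [auxT, rankIn, stepB]
  | cons n rest ih =>
    intro i xs c
    by_cases hl : PySem.Str.lower c = n
    · -- c matches the head candidate: rank = some i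
      have hfind : (xs ++ [c]).reverse.find? (fun c' => PySem.Str.lower c' == n)
          = some c := by
        simp [hl]
      unfold auxT
      rw [hfind]
      rw [rankIn]
      simp only [hl]
      cases hx : xs.reverse.find? (fun c' => PySem.Str.lower c' == n) with
      | some c' => simp [stepB]
      | none =>
        cases ha : auxT rest (i + 1) xs with
        | none => simp [stepB]
        | some p =>
          have hij : i + 1 ≤ p.1 := auxT_ge rest (i + 1) xs p.1 p.2 (by rw [ha])
          simp [stepB, Nat.le_of_lt (by omega : i < p.1)]
    · -- c does not match the head candidate
      have hfind : (xs ++ [c]).reverse.find? (fun c' => PySem.Str.lower c' == n)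
          = xs.reverse.find? (fun c' => PySem.Str.lower c' == n) := by
        simp [hl]
      unfold auxT
      rw [hfind]
      rw [rankIn]
      simp only [hl]
      cases hx : xs.reverse.find? (fun c' => PySem.Str.lower c' == n) with
      | none => exact ih (i + 1) xs c
      | some c' =>
        cases hr : rankIn rest (i + 1) (PySem.Str.lower c) with
        | none => simp [stepB]
        | some r =>
          have : i + 1 ≤ r := rankIn_ge rest (i + 1) _ r hr
          simp [stepB]
          omega

-- the triple fold splits into three independent folds
theorem fold_triple (xs : List String)
    (s1 s2 s3 : Option (Nat × String)) :
    xs.foldl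
      (fun (b : Option (Nat × String) × Option (Nat × String) × Option (Nat × String)) col =>
        let low := PySem.Str.lower col
        (stepB b.1 (rankIn startNames 0 low) col,
         stepB b.2.1 (rankIn endNames 0 low) col,
         stepB b.2.2 (rankIn durNames 0 low) col))
      (s1, s2, s3)
      = (xs.foldl (fun b col => stepB b (rankIn startNames 0 (PySem.Str.lower col)) col) s1,
         xs.foldl (fun b col => stepB b (rankIn endNames 0 (PySem.Str.lower col)) col) s2,
         xs.foldl (fun b col => stepB b (rankIn durNames 0 (PySem.Str.lower col)) col) s3) := by
  induction xs generalizing s1 s2 s3 with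
  | nil => rfl
  | cons x xs ih => simp [List.foldl_cons, ih]

theorem auxT_nil (L : List String) : ∀ (i : Nat), auxT L i [] = none := by
  induction L with
  | nil => intro i; simp [auxT]
  | cons n rest ih => intro i; simp [auxT]; exact ih (i + 1)

-- one category's fold equals the characterization auxT
theorem fold_eq_auxT (L : List String) (xs : List String) :
    xs.foldl (fun b col => stepB b (rankIn L 0 (PySem.Str.lower col)) col) none
      = auxT L 0 xs := by
  induction xs using List.reverseRecOn with
  | nil => simp [auxT_nil]
  | append_singleton xs c ih =>
    rw [List.foldl_append, List.foldl_cons, List.foldl_nil, ih, auxT_append]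

-- the candidate-priority / last-occurrence chain (A's shape after get_low/pyOr_find)
def chainPick : List String → List String → Option String
  | [], _ => none
  | n :: rest, xs =>
    match xs.reverse.find? (fun c => PySem.Str.lower c == n) with
    | some c => some c
    | none => chainPick rest xs

theorem mapSnd_auxT (L : List String) : ∀ (i : Nat) (xs : List String),
    (auxT L i xs).map Prod.snd = chainPick L xs := by
  induction L with
  | nil => intro i xs; simp [auxT, chainPick]
  | cons n rest ih =>
    intro i xs
    unfold auxT chainPick
    cases hf : xs.reverse.find? (fun c => PySem.Str.lower c == n) with
    | some c => simp
    | none => simp; exact ih (i + 1) xs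

theorem bestMap (L : List String) (xs : List String) :
    (xs.foldl (fun b col => stepB b (rankIn L 0 (PySem.Str.lower col)) col)
        (none : Option (Nat × String))).map Prod.snd
      = chainPick L xs := by
  rw [fold_eq_auxT, mapSnd_auxT]

theorem find?_last (columns : List String) (n : String) :
    (match columns.reverse.find? (fun c => PySem.Str.lower c == n) with
      | some c => some c
      | none => (none : Option String))
      = columns.reverse.find? (fun c => PySem.Str.lower c == n) := by
  cases columns.reverse.find? (fun c => PySem.Str.lower c == n) <;> rfl

-- ===== VERDICT (by name: the statement is the Claim_ definition above) =====
theorem select_time_columns_py_spec : Claim_equal_select_time_columns_py := by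
  intro columns _
  unfold Spec_select_time_columns_py select_time_columns_py select_time_columns_py_alt
  rw [fold_triple]
  simp only [bestMap, get_low, 
    pyOr_find columns "start" (by decide), pyOr_find columns "startns" (by decide),
    pyOr_find columns "start_ns" (by decide), pyOr_find columns "begin" (by decide),
    pyOr_find columns "end" (by decide), pyOr_find columns "endns" (by decide),
    pyOr_find columns "end_ns" (by decide),
    pyOr_find columns "duration" (by decide), pyOr_find columns "dur" (by decide),
    pyOr_find columns "dur_ns" (by decide), pyOr_find columns "durationns" (by decide),
    startNames, endNames, durNames, chainPick, find?_last]
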